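-- pv_equiv track=rewrite | github.com/madara88645/Compiler | app/heuristics.py | generate_clarify_questions
-- ===== SOURCE A (Python) =====
-- AMBIGUOUS_TERMS = {
--     'optimize': "Which metric or aspect should be optimized? (performance, cost, memory?)",
--     'improve': "What specific improvement dimension matters (speed, accuracy, UX?)",
--     'better': "Better in what sense (quality, efficiency, reliability?)",
--     'efficient': "Which resource should be minimized (time, memory, cost?)",
--     'scalable': "Target scale or concurrency level?",
--     'fast': "What response time / throughput target?",
--     'robust': "Robust against which failures or edge cases?",
-- }
--
-- def generate_clarify_questions(terms: list[str]) -> list[str]: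
--     qs: list[str] = []
--     for t in terms:
--         hint = AMBIGUOUS_TERMS.get(t)
--         if hint and hint not in qs:
--             qs.append(hint)
--         if len(qs) >= 5:
--             break
--     return qs
-- ===== SOURCE B (Python) =====
-- AMBIGUOUS_TERMS = {
--     'optimize': "Which metric or aspect should be optimized? (performance, cost, memory?)",
--     'improve': "What specific improvement dimension matters (speed, accuracy, UX?)",
--     'better': "Better in what sense (quality, efficiency, reliability?)",
--     'efficient': "Which resource should be minimized (time, memory, cost?)",
--     'scalable': "Target scale or concurrency level?",
--     'fast': "What response time / throughput target?",
--     'robust': "Robust against which failures or edge cases?",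
-- }
--
-- def generate_clarify_questions(terms: list[str]) -> list[str]:
--     # Shrinking candidate map: a term's key is POPPED from `remaining` when its
--     # hint is emitted, so deduplication is by key removal from the input map
--     # (no membership test on the output), and a countdown of free slots,
--     # checked before each term, caps the result (no length inspection).
--     remaining = dict(AMBIGUOUS_TERMS)
--     out: list[str] = []
--     slots = 5
--     for t in terms:
--         if slots == 0:
--             break
--         hint = remaining.pop(t, None)
--         if hint is not None:
--             out.append(hint)
--             slots -= 1
--     return out
-- ===== Notes on version B (the rewrite author's own statement) =====
-- stated objective: alternative
-- what changed: Dedup and cap are driven by a SHRINKING candidate map and a slots countdown: an emitted term's key is popped from a copy of AMBIGUOUS_TERMS (so duplicates simply miss), replacing A's growing-output membership test 'hint not in qs' and its after-append len(qs)>=5 break with a pop from the input map and a pre-checked countdown.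
import Mathlib
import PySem

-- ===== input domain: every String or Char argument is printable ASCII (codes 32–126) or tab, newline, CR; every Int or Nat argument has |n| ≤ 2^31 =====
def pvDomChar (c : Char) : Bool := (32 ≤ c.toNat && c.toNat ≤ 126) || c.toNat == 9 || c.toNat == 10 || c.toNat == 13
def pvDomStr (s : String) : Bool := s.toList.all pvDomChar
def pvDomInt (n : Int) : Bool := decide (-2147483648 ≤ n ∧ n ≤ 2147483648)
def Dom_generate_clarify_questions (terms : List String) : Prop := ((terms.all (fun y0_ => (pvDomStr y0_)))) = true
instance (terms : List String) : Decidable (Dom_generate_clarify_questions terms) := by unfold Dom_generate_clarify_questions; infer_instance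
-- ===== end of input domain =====

-- B replaces A's accumulator loop (membership dedup + length break) by a recursion over a
-- shrinking candidate map with a slots countdown; same values, no speed claim.

-- ===== PORT A =====
def pvAMB : PySem.Dict String String := PySem.Dict.mk [
  ("optimize", "Which metric or aspect should be optimized? (performance, cost, memory?)"),
  ("improve", "What specific improvement dimension matters (speed, accuracy, UX?)"),
  ("better", "Better in what sense (quality, efficiency, reliability?)"),
  ("efficient", "Which resource should be minimized (time, memory, cost?)"),
  ("scalable", "Target scale or concurrency level?"),
  ("fast", "What response time / throughput target?"),
  ("robust", "Robust against which failures or edge cases?")]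

-- A's 'for t in terms' loop: accumulator qs, truthiness+membership guard, break at len 5
def pvGoA : List String → List String → List String
  | [], qs => qs
  | t :: ts, qs =>
    let qs' := match pvAMB.get? t with
      | some hint => if hint ≠ "" ∧ ¬ (hint ∈ qs) then qs ++ [hint] else qs
      | none => qs
    if qs'.length ≥ 5 then qs' else pvGoA ts qs'

def generate_clarify_questions (terms : List String) : List String := pvGoA terms []

-- ===== PORT B =====
-- Source B's loop: state (remaining, out, slots); remaining.pop(t, None) is Dict.pop?
def pvGoB : List String → PySem.Dict String String → List String → Nat → List String
  | [], _, out, _ => out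
  | t :: ts, remaining, out, slots =>
    if slots = 0 then out
    else match remaining.pop? t with
      | none => pvGoB ts remaining out slots
      | some (hint, remaining') => pvGoB ts remaining' (out ++ [hint]) (slots - 1)

def generate_clarify_questions_alt (terms : List String) : List String := pvGoB terms pvAMB [] 5

-- ===== PRECONDITION & SPEC =====
def Spec_generate_clarify_questions (terms : List String) (out : List String) : Prop := out = generate_clarify_questions_alt terms
instance (terms : List String) (out : List String) : Decidable (Spec_generate_clarify_questions terms out) := by unfold Spec_generate_clarify_questions; infer_instance

-- ===== CLAIM (what is proved, stated in full; the proofs are below) =====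
def Claim_equal_generate_clarify_questions : Prop := ∀ (terms : List String), Dom_generate_clarify_questions terms → Spec_generate_clarify_questions terms (generate_clarify_questions terms)

-- ===== LEMMAS AND PROOFS =====

-- every value stored in the AMBIGUOUS_TERMS dict is a nonempty string
lemma pvAMB_val_ne (t h : String) (hg : pvAMB.get? t = some h) : h ≠ "" := by
  simp only [pvAMB, PySem.Dict.get?_mk_cons] at hg
  split_ifs at hg
  all_goals first
    | (injection hg with hg; subst hg; decide)
    | simp [PySem.Dict.get?] at hg

-- a successful lookup comes from a pair of the underlying items list
lemma mem_of_get?_mk (l : List (String × String)) (t h : String)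
    (hg : (PySem.Dict.mk l).get? t = some h) : (t, h) ∈ l := by
  induction l with
  | nil => simp [PySem.Dict.get?] at hg
  | cons p l ih =>
    obtain ⟨a, b⟩ := p
    rw [PySem.Dict.get?_mk_cons] at hg
    by_cases hp : a = t
    · rw [if_pos (by simpa using hp)] at hg
      injection hg with hg
      rw [← hp, ← hg]
      exact List.mem_cons_self
    · exact List.mem_cons_of_mem _ (ih (by rwa [if_neg (by simpa using hp)] at hg))

-- distinct keys of the fixed dict hold distinct hint values
lemma pvAMB_inj (t t' h : String) (h1 : pvAMB.get? t = some h)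
    (h2 : pvAMB.get? t' = some h) : t = t' := by
  have hnd : (pvAMB.items.map Prod.snd).Nodup := by decide
  have := List.inj_on_of_nodup_map hnd (mem_of_get?_mk _ _ _ h1) (mem_of_get?_mk _ _ _ h2) rfl
  exact congrArg Prod.fst this

-- lookup in the key-erased dict
lemma get?_mk_filter (l : List (String × String)) (t x : String) :
    (PySem.Dict.mk (l.filter (fun p => p.1 != t))).get? x
      = if x = t then none else (PySem.Dict.mk l).get? x := by
  induction l with
  | nil => simp [PySem.Dict.get?]
  | cons p l ih =>
    obtain ⟨a, b⟩ := p
    by_cases hkt : a = t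
    · rw [List.filter_cons_of_neg (by simp [hkt]), ih]
      by_cases hxt : x = t
      · simp [hxt]
      · rw [if_neg hxt, if_neg hxt, PySem.Dict.get?_mk_cons,
          if_neg (by simpa using fun he : a = x => hxt (he ▸ hkt))]
    · rw [List.filter_cons_of_pos (by simpa using hkt), PySem.Dict.get?_mk_cons]
      by_cases hkx : a = x
      · have hxt : ¬ x = t := fun he => hkt (hkx.trans he)
        rw [if_pos (by simpa using hkx), if_neg hxt, PySem.Dict.get?_mk_cons,
          if_pos (by simpa using hkx)]
      · rw [if_neg (by simpa using hkx), ih]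
        by_cases hxt : x = t
        · simp [hxt]
        · rw [if_neg hxt, if_neg hxt, PySem.Dict.get?_mk_cons,
            if_neg (by simpa using hkx)]

lemma get?_erase (d : PySem.Dict String String) (t x : String) :
    (d.erase t).get? x = if x = t then none else d.get? x :=
  get?_mk_filter d.items t x

lemma pvGoB_zero (ts : List String) (rem : PySem.Dict String String) (out : List String) :
    pvGoB ts rem out 0 = out := by cases ts <;> simp [pvGoB]

-- the loop correspondence: rem is AMBIGUOUS minus the keys whose hints are in qs,
-- and slots is what remains of the cap
lemma pvGo_eq (ts : List String) : ∀ (qs : List String) (rem : PySem.Dict String String),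
    qs.length < 5 →
    (∀ x, rem.get? x = match pvAMB.get? x with
        | some h => if h ∈ qs then none else some h
        | none => none) →
    pvGoA ts qs = pvGoB ts rem qs (5 - qs.length) := by
  induction ts with
  | nil => intro qs rem _ _; simp [pvGoA, pvGoB]
  | cons t ts ih =>
    intro qs rem hlt hrem
    have hs0 : ¬ (5 - qs.length = 0) := by omega
    have h5 : ¬ qs.length ≥ 5 := by omega
    cases hA : pvAMB.get? t with
    | none =>
      have hr : rem.pop? t = none := by
        simp [PySem.Dict.pop?]; rw [hrem t, hA]
      simp only [pvGoA, hA, pvGoB, hr]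
      rw [if_neg hs0, if_neg h5]
      exact ih qs rem hlt hrem
    | some h =>
      by_cases hmem : h ∈ qs
      · have hr : rem.pop? t = none := by
          simp [PySem.Dict.pop?]; rw [hrem t, hA]; simp [hmem]
        simp only [pvGoA, hA, hmem, not_true, and_false, if_false, pvGoB, hr]
        rw [if_neg hs0, if_neg h5]
        exact ih qs rem hlt hrem
      · have hr : rem.pop? t = some (h, rem.erase t) := by
          simp only [PySem.Dict.pop?]; rw [hrem t, hA]; simp [hmem]
        have hcond : (h ≠ "" ∧ ¬ h ∈ qs) := ⟨pvAMB_val_ne t h hA, hmem⟩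
        simp only [pvGoA, hA, if_pos hcond, pvGoB, hr]
        rw [if_neg hs0]
        have hrem' : ∀ x, (rem.erase t).get? x
            = match pvAMB.get? x with
              | some h' => if h' ∈ qs ++ [h] then none else some h'
              | none => none := by
          intro x
          rw [get?_erase]
          by_cases hxt : x = t
          · subst hxt; simp [hA]
          · rw [if_neg hxt, hrem x]
            cases hx : pvAMB.get? x with
            | none => rfl
            | some h' =>
              have hhh : h' ≠ h := fun he => hxt (pvAMB_inj x t h (he ▸ hx) hA)
              simp [List.mem_append, hhh]
        by_cases h4 : qs.length = 4
        · rw [if_pos (by simp [h4]),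
            (by omega : 5 - qs.length - 1 = 0), pvGoB_zero]
        · rw [if_neg (by simp only [List.length_append, List.length_cons, List.length_nil]; omega)]
          rw [ih (qs ++ [h]) _
            (by simp only [List.length_append, List.length_cons, List.length_nil]; omega) hrem']
          congr 1
          simp only [List.length_append, List.length_cons, List.length_nil]
          omega

-- ===== VERDICT (by name: the statement is the Claim_ definition above) =====
theorem generate_clarify_questions_spec : Claim_equal_generate_clarify_questions := by
  intro terms _
  unfold Spec_generate_clarify_questions generate_clarify_questions generate_clarify_questions_alt
  rw [pvGo_eq terms [] pvAMB (by simp) (by intro x; cases pvAMB.get? x <;> simp)]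
  rfl
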